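-- pv_equiv track=rewrite | github.com/Armand028/Python- | For_While_Loops.py | nombre
-- ===== SOURCE A (Python) =====
-- def nombre(s):
--     '''int->int cette fonction renvoie un nombre sans donné sans les espaces. si le nomùbre saisi contre autre chose que des espaces et des chiffre la fonction return rien'''
--     i=[]
--     v=""
--     for j in s:
--         if (j==" "):
--             del(j)
--         elif(j=='0' or j=='1' or j=='2' or j=='3' or j=='4' or j=='5' or j=='6' or j=='7' or j=='8' or j=='9' or j=='-'):
--             i.append(j)
--         else:
--             return None
--     for x in i:
--         v=v+str(x)
--     return v
-- ===== SOURCE B (Python) =====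
-- def nombre(s):
--     n = len(s)
--     if n == 0:
--         return ''
--     if n == 1:
--         if s == ' ':
--             return ''
--         return s if s in '0123456789-' else None
--     m = n // 2
--     left = nombre(s[:m])
--     right = nombre(s[m:])
--     if left is None or right is None:
--         return None
--     return left + right
-- ===== Notes on version B (the rewrite author's own statement) =====
-- stated objective: alternative
-- what changed: Replaces A's single left-to-right validate-and-collect loop plus join loop by a divide-and-conquer recursion: split the string in half, solve each half, combine with None-propagation and concatenation.
import Mathlib
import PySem

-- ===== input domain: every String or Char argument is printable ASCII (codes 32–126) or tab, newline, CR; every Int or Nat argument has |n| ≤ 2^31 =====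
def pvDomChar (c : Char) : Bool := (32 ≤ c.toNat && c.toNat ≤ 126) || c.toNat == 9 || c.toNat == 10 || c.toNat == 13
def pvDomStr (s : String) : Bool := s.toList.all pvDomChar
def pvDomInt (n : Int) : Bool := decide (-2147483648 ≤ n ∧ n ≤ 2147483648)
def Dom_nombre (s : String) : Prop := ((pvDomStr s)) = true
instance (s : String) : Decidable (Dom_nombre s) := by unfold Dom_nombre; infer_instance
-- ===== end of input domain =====

-- B replaces A's linear validate-and-collect loop (plus join loop) by a divide-and-conquer recursion on string halves; return values agree on every string.


-- ===== PORT A =====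
-- A's first loop: scan the chars; skip spaces, append digits/'-' to i, anything else returns None
def nombreGo : List Char → List Char → Option (List Char)
  | [], i => some i
  | j :: rest, i =>
    if j = ' ' then nombreGo rest i
    else if (j = '0' ∨ j = '1' ∨ j = '2' ∨ j = '3' ∨ j = '4' ∨ j = '5' ∨ j = '6' ∨
             j = '7' ∨ j = '8' ∨ j = '9' ∨ j = '-') then nombreGo rest (i ++ [j])
    else none

def nombre (s : String) : Option String :=
  match nombreGo s.toList [] with
  | none => none
  | some i => some (String.mk (i.foldl (fun v x => v ++ [x]) []))  -- A's second loop: v = v + str(x)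

-- ===== PORT B =====
-- Source B's divide-and-conquer: empty → '', single char → base case, else split at len//2 and combine
def nombreAltGo : List Char → Option (List Char)
  | [] => some []
  | [c] =>
    if c = ' ' then some []
    else if (['0','1','2','3','4','5','6','7','8','9','-'].contains c) then some [c]
    else none
  | a :: b :: rest =>
    let m := (a :: b :: rest).length / 2
    match nombreAltGo ((a :: b :: rest).take m), nombreAltGo ((a :: b :: rest).drop m) with
    | some l, some r => some (l ++ r)
    | _, _ => none
termination_by cs => cs.length
decreasing_by
  · simp; omega
  · simp; omega

def nombre_alt (s : String) : Option String := (nombreAltGo s.toList).map String.mk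

-- ===== PRECONDITION & SPEC =====
def Spec_nombre (s : String) (out : Option String) : Prop := out = nombre_alt s
instance (s : String) (out : Option String) : Decidable (Spec_nombre s out) := by unfold Spec_nombre; infer_instance

-- ===== CLAIM (what is proved, stated in full; the proofs are below) =====
def Claim_equal_nombre : Prop := ∀ (s : String), Dom_nombre s → Spec_nombre s (nombre s)

-- ===== LEMMAS AND PROOFS =====
def pvOk (c : Char) : Bool :=
  c == '0' || c == '1' || c == '2' || c == '3' || c == '4' || c == '5' || c == '6' ||
  c == '7' || c == '8' || c == '9' || c == '-'

theorem pvOk_iff (c : Char) :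
    (c = '0' ∨ c = '1' ∨ c = '2' ∨ c = '3' ∨ c = '4' ∨ c = '5' ∨ c = '6' ∨
     c = '7' ∨ c = '8' ∨ c = '9' ∨ c = '-') ↔ pvOk c = true := by
  simp [pvOk, Bool.or_assoc]

theorem contains_eq_pvOk (c : Char) :
    (['0','1','2','3','4','5','6','7','8','9','-'].contains c) = pvOk c := by
  rw [Bool.eq_iff_iff]; simp [pvOk]; tauto

-- canonical form both ports reduce to
def pvNorm (cs : List Char) : Option (List Char) :=
  if (cs.filter (fun c => c ≠ ' ')).all pvOk then some (cs.filter (fun c => c ≠ ' '))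
  else none

theorem pvNorm_cons_sp (rest : List Char) : pvNorm (' ' :: rest) = pvNorm rest := by
  simp [pvNorm]

theorem pvNorm_cons_ok {j : Char} (hsp : ¬ j = ' ') (hok : pvOk j = true) (rest : List Char) :
    pvNorm (j :: rest) = (pvNorm rest).map (fun t => j :: t) := by
  simp [pvNorm, hsp, hok]

theorem pvNorm_cons_bad {j : Char} (hsp : ¬ j = ' ') (hok : ¬ pvOk j = true) (rest : List Char) :
    pvNorm (j :: rest) = none := by
  simp [pvNorm, hsp, List.all_cons, hok]

theorem nombreGo_eq (cs : List Char) : ∀ i : List Char,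
    nombreGo cs i = (pvNorm cs).map (fun t => i ++ t) := by
  induction cs with
  | nil => intro i; simp [nombreGo, pvNorm]
  | cons j rest ih =>
    intro i
    by_cases hsp : j = ' '
    · subst hsp; simp [nombreGo, ih, pvNorm_cons_sp]
    · by_cases hok : pvOk j = true
      · rw [show nombreGo (j :: rest) i = nombreGo rest (i ++ [j]) by
          simp [nombreGo, hsp, (pvOk_iff j).mpr hok]]
        rw [ih, pvNorm_cons_ok hsp hok]
        cases pvNorm rest <;> simp
      · have hbad : ¬ (j = '0' ∨ j = '1' ∨ j = '2' ∨ j = '3' ∨ j = '4' ∨ j = '5' ∨ j = '6' ∨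
            j = '7' ∨ j = '8' ∨ j = '9' ∨ j = '-') := fun h => hok ((pvOk_iff j).mp h)
        simp [nombreGo, hsp, hbad, pvNorm_cons_bad hsp hok]

theorem pvNorm_append (xs ys : List Char) :
    pvNorm (xs ++ ys) =
      match pvNorm xs, pvNorm ys with
      | some l, some r => some (l ++ r)
      | _, _ => none := by
  unfold pvNorm
  rw [List.filter_append, List.all_append]
  cases hx : (xs.filter (fun c => c ≠ ' ')).all pvOk <;>
    cases hy : (ys.filter (fun c => c ≠ ' ')).all pvOk <;> simp

theorem nombreAltGo_eq : ∀ (cs : List Char), nombreAltGo cs = pvNorm cs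
  | [] => by simp [nombreAltGo, pvNorm]
  | [c] => by
    by_cases hsp : c = ' '
    · simp [nombreAltGo, hsp, pvNorm]
    · rw [show nombreAltGo [c] =
          (if (['0','1','2','3','4','5','6','7','8','9','-'].contains c) then some [c] else none) by
        simp [nombreAltGo, hsp]]
      rw [contains_eq_pvOk]
      by_cases hok : pvOk c = true
      · rw [if_pos hok, pvNorm_cons_ok hsp hok]
        simp [pvNorm]
      · rw [if_neg hok, pvNorm_cons_bad hsp hok]
  | a :: b :: rest => by
    have h1 := nombreAltGo_eq ((a :: b :: rest).take ((a :: b :: rest).length / 2))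
    have h2 := nombreAltGo_eq ((a :: b :: rest).drop ((a :: b :: rest).length / 2))
    rw [show nombreAltGo (a :: b :: rest) =
        (match nombreAltGo ((a :: b :: rest).take ((a :: b :: rest).length / 2)),
               nombreAltGo ((a :: b :: rest).drop ((a :: b :: rest).length / 2)) with
         | some l, some r => some (l ++ r)
         | _, _ => none) from by rw [nombreAltGo]]
    rw [h1, h2, ← pvNorm_append, List.take_append_drop]
termination_by cs => cs.length
decreasing_by
  · simp; omega
  · simp; omega

theorem flatten_map_singleton (l : List Char) : (List.map (fun x => [x]) l).flatten = l := by
  induction l with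
  | nil => rfl
  | cons x xs ih => simp [ih]

-- ===== VERDICT (by name: the statement is the Claim_ definition above) =====
theorem nombre_spec : Claim_equal_nombre := by
  intro s _
  show nombre s = nombre_alt s
  unfold nombre nombre_alt
  rw [nombreGo_eq, nombreAltGo_eq]
  cases h : pvNorm s.toList with
  | none => simp
  | some t => simp [flatten_map_singleton]
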